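-- pv_equiv track=rewrite | github.com/elaynetron/1003-ICT | Functions.py | VerifyDayTime
-- ===== SOURCE A (Python) =====
-- DAYS = ("Mon", "Tue", "Wed", "Thu", "Fri", "Sat", "Sun")
--
-- TIME = ("Breakfast", "Lunch", "Dinner")
--
-- def VerifyDayTime(sDayTime : str) -> bool:
--     # Code done by Chua Zhi Loon James
--     '''To verify the days and times in database file are valid'''
--
--     if sDayTime == "All_Day":
--         return True
--
--     lDayTime = sDayTime.split("_")
--
--     if len(lDayTime) not in (1, 2):
--         return False
--
--     lCheckList = TIME if lDayTime[0] in TIME else DAYS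
--
--     for sIndividualDayTime in lDayTime:
--         if sIndividualDayTime not in lCheckList:
--             return False
--
--     return True
-- ===== SOURCE B (Python) =====
-- DAYS = ("Mon", "Tue", "Wed", "Thu", "Fri", "Sat", "Sun")
--
-- TIME = ("Breakfast", "Lunch", "Dinner")
--
-- # All valid day/time strings, enumerated once up front: "All_Day", every single
-- # token, and every same-category pair. Validation is then one set lookup.
-- _VALID = frozenset(
--     {"All_Day"}
--     | set(TIME)
--     | {a + "_" + b for a in TIME for b in TIME}
--     | set(DAYS)
--     | {a + "_" + b for a in DAYS for b in DAYS}
-- )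
--
-- def VerifyDayTime(sDayTime: str) -> bool:
--     return sDayTime in _VALID
-- ===== Notes on version B (the rewrite author's own statement) =====
-- stated objective: idiomatic
-- what changed: Replaces the split/branch/loop validator with a frozenset of all 69 valid strings precomputed from TIME and DAYS, so validation is a single set-membership test.
import Mathlib
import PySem

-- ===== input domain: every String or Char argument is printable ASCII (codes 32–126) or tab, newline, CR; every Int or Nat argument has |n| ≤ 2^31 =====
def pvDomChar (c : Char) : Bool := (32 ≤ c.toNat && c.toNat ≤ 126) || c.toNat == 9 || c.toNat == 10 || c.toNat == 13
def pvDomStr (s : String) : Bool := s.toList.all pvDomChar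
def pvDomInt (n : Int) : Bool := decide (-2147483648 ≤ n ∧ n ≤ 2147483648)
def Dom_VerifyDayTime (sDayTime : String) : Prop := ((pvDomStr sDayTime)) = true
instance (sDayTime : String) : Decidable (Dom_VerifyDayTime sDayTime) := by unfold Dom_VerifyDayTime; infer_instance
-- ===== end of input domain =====

-- B replaces A's split/branch/loop validator with one membership test in a
-- precomputed set of all 69 valid day/time strings (objective: idiomatic).

set_option maxRecDepth 8192


-- ===== PORT A =====
def pvDAYS : List String := ["Mon", "Tue", "Wed", "Thu", "Fri", "Sat", "Sun"]

def pvTIME : List String := ["Breakfast", "Lunch", "Dinner"]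

def VerifyDayTime (sDayTime : String) : Bool :=
  if sDayTime == "All_Day" then true
  else
    -- sDayTime.split("_"): the separator "_" is nonempty, so split? is `some`
    let lDayTime := (PySem.Str.split? sDayTime "_").getD []
    if !(lDayTime.length == 1 || lDayTime.length == 2) then false
    else
      -- lDayTime[0]: in range here, since split never returns [] and length ∈ {1,2}
      let first := (PySem.List.pyGet? lDayTime 0).getD ""
      let lCheckList := if pvTIME.contains first then pvTIME else pvDAYS
      -- the for loop returning False on the first miss, True otherwise
      lDayTime.all (fun t => lCheckList.contains t)

-- ===== PORT B =====
-- frozenset({"All_Day"} | set(TIME) | {a_b pairs} | set(DAYS) | {a_b pairs})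
def pvVALID : PySem.Set String :=
  PySem.Set.union (PySem.Set.union (PySem.Set.union (PySem.Set.union
    (PySem.Set.ofList ["All_Day"])
    pvTIME)
    (pvTIME.flatMap (fun a => pvTIME.map (fun b => a ++ "_" ++ b))))
    pvDAYS)
    (pvDAYS.flatMap (fun a => pvDAYS.map (fun b => a ++ "_" ++ b)))

def VerifyDayTime_alt (sDayTime : String) : Bool :=
  PySem.Set.contains pvVALID sDayTime

-- ===== PRECONDITION & SPEC =====
def Spec_VerifyDayTime (sDayTime : String) (out : Bool) : Prop := out = VerifyDayTime_alt sDayTime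
instance (sDayTime : String) (out : Bool) : Decidable (Spec_VerifyDayTime sDayTime out) := by unfold Spec_VerifyDayTime; infer_instance

-- ===== CLAIM (what is proved, stated in full; the proofs are below) =====
def Claim_equal_VerifyDayTime : Prop := ∀ (sDayTime : String), Dom_VerifyDayTime sDayTime → Spec_VerifyDayTime sDayTime (VerifyDayTime sDayTime)

-- ===== LEMMAS AND PROOFS =====

-- splitOn.go always returns acc.reverse ++ ps with ps nonempty and sep.join(ps) = cur.reverse ++ l
theorem pv_go_spec (sep : List Char) :
    ∀ (fuel : Nat) (l cur : List Char) (acc : List (List Char)), ∃ ps : List (List Char), ps ≠ [] ∧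
      PySem.Chars.splitOn.go sep fuel l cur acc = acc.reverse ++ ps ∧
      PySem.Chars.join sep ps = cur.reverse ++ l := by
  intro fuel
  induction fuel with
  | zero =>
    intro l cur acc
    exact ⟨[cur.reverse ++ l], by simp, by simp [PySem.Chars.splitOn.go], PySem.Chars.join_singleton _ _⟩
  | succ fuel ih =>
    intro l cur acc
    cases l with
    | nil =>
      exact ⟨[cur.reverse], by simp, by simp [PySem.Chars.splitOn.go], by simp [PySem.Chars.join_singleton]⟩
    | cons c rest =>
      by_cases hp : sep.isPrefixOf (c :: rest) = true
      · obtain ⟨ps, hne, heq, hjoin⟩ := ih (List.drop sep.length (c :: rest)) [] ((cur.reverse) :: acc)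
        refine ⟨cur.reverse :: ps, by simp, ?_, ?_⟩
        · rw [PySem.Chars.splitOn.go, if_pos hp, heq]; simp
        · obtain ⟨t, ht⟩ := List.isPrefixOf_iff_prefix.mp hp
          cases ps with
          | nil => exact absurd rfl hne
          | cons p ps' =>
            rw [PySem.Chars.join_cons_cons, hjoin, ← ht]
            simp
      · obtain ⟨ps, hne, heq, hjoin⟩ := ih rest (c :: cur) acc
        refine ⟨ps, hne, ?_, ?_⟩
        · rw [PySem.Chars.splitOn.go, if_neg hp, heq]
        · rw [hjoin]; simp

-- joining the pieces of splitOn with the separator gives the string back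
theorem pv_join_splitOn (cs sep : List Char) :
    PySem.Chars.splitOn cs sep ≠ [] ∧
    PySem.Chars.join sep (PySem.Chars.splitOn cs sep) = cs := by
  obtain ⟨ps, hne, heq, hjoin⟩ := pv_go_spec sep (cs.length + 1) cs [] []
  unfold PySem.Chars.splitOn
  rw [heq]
  simpa using ⟨hne, hjoin⟩

theorem pv_single_valid : ∀ t ∈ pvTIME ++ pvDAYS, VerifyDayTime_alt t = true := by decide

theorem pv_time_pair_valid : ∀ a ∈ pvTIME, ∀ b ∈ pvTIME,
    VerifyDayTime_alt (a ++ "_" ++ b) = true := by decide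

theorem pv_days_pair_valid : ∀ a ∈ pvDAYS, ∀ b ∈ pvDAYS,
    VerifyDayTime_alt (a ++ "_" ++ b) = true := by decide

theorem pv_valid_accepted : ∀ s ∈ (pvVALID : List String), VerifyDayTime s = true := by decide

-- A true → B true
theorem pv_forward (s : String) (h : VerifyDayTime s = true) : VerifyDayTime_alt s = true := by
  unfold VerifyDayTime at h
  by_cases hall : (s == "All_Day") = true
  · rw [beq_iff_eq] at hall
    subst hall; decide
  · rw [if_neg hall] at h
    obtain ⟨hne, hjoin⟩ := pv_join_splitOn s.toList "_".toList
    have hsplit : PySem.Str.split? s "_" =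
        some ((PySem.Chars.splitOn s.toList "_".toList).map String.ofList) := by
      simp [PySem.Str.split?, PySem.Chars.split?]
    rw [hsplit] at h
    simp only [Option.getD_some] at h
    revert h hjoin
    cases hps : PySem.Chars.splitOn s.toList "_".toList with
    | nil => exact absurd hps hne
    | cons t rest =>
      cases rest with
      | nil =>
        -- one piece: s = t
        rw [PySem.Chars.join_singleton]
        intro hjoin h
        have hs : s = String.ofList t := by rw [hjoin, String.ofList_toList]
        simp [PySem.List.pyGet?, PySem.List.pyIdx?] at h
        split_ifs at h with hm
        · rw [hs]
          exact pv_single_valid _ (List.mem_append_left _ h)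
        · rw [hs]
          exact pv_single_valid _ (List.mem_append_right _ h)
      | cons t2 rest2 =>
        cases rest2 with
        | cons t3 rest3 =>
          intro _ h
          rw [if_pos] at h
          · exact absurd h (by simp)
          · simp
        | nil =>
          rw [PySem.Chars.join_cons_cons, PySem.Chars.join_singleton]
          intro hjoin h
          have hs : s = String.ofList t ++ "_" ++ String.ofList t2 := by
            have : (String.ofList t ++ "_" ++ String.ofList t2).toList = s.toList := by
              rw [← hjoin]; simp
            calc s = String.ofList s.toList := (String.ofList_toList).symm
              _ = _ := by rw [← this, String.ofList_toList]
          simp [PySem.List.pyGet?, PySem.List.pyIdx?] at h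
          split_ifs at h with hm
          · simp at h hm
            rw [hs]
            exact pv_time_pair_valid _ h.1 _ h.2
          · simp at h hm
            rw [hs]
            exact pv_days_pair_valid _ h.1 _ h.2

-- B true → A true
theorem pv_backward (s : String) (h : VerifyDayTime_alt s = true) : VerifyDayTime s = true := by
  unfold VerifyDayTime_alt at h
  rw [PySem.Set.contains_iff] at h
  exact pv_valid_accepted s h

-- ===== VERDICT (by name: the statement is the Claim_ definition above) =====
theorem VerifyDayTime_spec : Claim_equal_VerifyDayTime := by
  intro s _
  unfold Spec_VerifyDayTime
  cases hA : VerifyDayTime s with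
  | true => exact (pv_forward s hA).symm
  | false =>
    cases hB : VerifyDayTime_alt s with
    | true => rw [pv_backward s hB] at hA; exact absurd hA (by simp)
    | false => rfl
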